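-- pv_equiv track=rewrite | github.com/5tack5mith/AOC | 2025/day4/part2.py | forklift
-- ===== SOURCE A (Python) =====
-- def forklift (grid,sum):
--     r = len(grid)
--     c = len(grid[0])
--     count=0
--     rem = grid
--     for i in range(0,r):
--         for j in range(0,c):
--             p=0
--             if grid[i][j]=='@':
--                 for k in range(i-1,i+2):
--                     if k < 0 or k>r-1 :
--                         continue
--                     for l in range(j-1,j+2):
--                         if l< 0 or l>c-1 :
--                             continue
--                         if grid[k][l]=="@":
--                             p=p+1
--                 if p<=4:
--                     count+=1
--                     rem[i][j]="X"
--     sum+=count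
--     grid=rem
--     if(count==0):
--         return sum
--     else:
--         return forklift(grid,sum)
-- ===== SOURCE B (Python) =====
-- # B: functional k-core-style erosion on a set of coordinates: extract the '@' cells once,
-- # then repeatedly (simultaneously) drop every cell with fewer than 4 live 8-neighbours until
-- # stable; answer = sum + number of dropped cells.  (Return-value equivalence only: A mutates
-- # grid in place, B does not.)
-- OFFS = ((-1, -1), (-1, 0), (-1, 1), (0, -1), (0, 1), (1, -1), (1, 0), (1, 1))
--
-- def forklift(grid, sum):
--     r = len(grid)
--     c = len(grid[0])
--     live = [(i, j) for i in range(r) for j in range(c) if grid[i][j] == '@']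
--     total = len(live)
--     while True:
--         member = set(live)
--         keep = [(i, j) for (i, j) in live
--                 if len([1 for (di, dj) in OFFS if (i + di, j + dj) in member]) >= 4]
--         if len(keep) == len(live):
--             return sum + total - len(keep)
--         live = keep
-- ===== Notes on version B (the rewrite author's own statement) =====
-- stated objective: alternative
-- what changed: A recursively re-scans and mutates the grid in place, removing eligible '@' cells one at a time in raster order until a full pass removes nothing; B extracts the '@' coordinates once and iterates a purely functional simultaneous filter (drop every cell with <4 live 8-neighbours) to a fixpoint, returning sum plus the number of dropped cells - removal order does not affect the final stable set.
import Mathlib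
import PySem

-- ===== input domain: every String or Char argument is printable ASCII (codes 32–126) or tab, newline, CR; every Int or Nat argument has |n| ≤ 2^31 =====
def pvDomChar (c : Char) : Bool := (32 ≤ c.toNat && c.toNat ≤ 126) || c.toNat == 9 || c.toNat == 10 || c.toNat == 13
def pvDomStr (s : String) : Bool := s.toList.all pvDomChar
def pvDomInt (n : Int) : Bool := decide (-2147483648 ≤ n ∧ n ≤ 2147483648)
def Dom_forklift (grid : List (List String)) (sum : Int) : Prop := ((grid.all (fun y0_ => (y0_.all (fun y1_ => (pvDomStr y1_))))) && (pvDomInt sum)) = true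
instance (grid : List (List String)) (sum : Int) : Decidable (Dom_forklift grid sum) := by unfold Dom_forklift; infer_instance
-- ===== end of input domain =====

-- B iteratively filters the set of '@' coordinates instead of recursively re-scanning and
-- mutating the grid; return-value equivalence only (Python A mutates `grid` in place, B does not).

-- ===== PORT A =====
-- grid[k][l] (exact for indices Python accepts without IndexError; out-of-range reads,
-- which raise in Python, are excluded by Pre_forklift and give the harmless default "")
def gridCell (grid : List (List String)) (k l : Int) : String :=
  ((PySem.List.pyGet? grid k).bind (fun row => PySem.List.pyGet? row l)).getD ""

-- rem[i][j] = "X"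
def setCell (grid : List (List String)) (i j : Int) : List (List String) :=
  grid.set i.toNat ((grid.getD i.toNat []).set j.toNat "X")

-- the p-counting double loop over range(i-1,i+2) × range(j-1,j+2) with the continue guards
def neighP (grid : List (List String)) (r c i j : Int) : Nat :=
  (PySem.List.pyRange (i-1) (i+2) 1).foldl (fun p k =>
    if k < 0 ∨ k > r - 1 then p
    else (PySem.List.pyRange (j-1) (j+2) 1).foldl (fun p l =>
      if l < 0 ∨ l > c - 1 then p
      else if gridCell grid k l = "@" then p + 1 else p) p) 0

-- the body of A's double loop, at one cell (i, j), acting on the state (grid, count)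
def stepA (r c : Int) (st : List (List String) × Nat) (x : Int × Int) :
    List (List String) × Nat :=
  if gridCell st.1 x.1 x.2 = "@" then
    if neighP st.1 r c x.1 x.2 ≤ 4 then (setCell st.1 x.1 x.2, st.2 + 1) else st
  else st

-- one full pass of A's double loop: for i in range(0,r): for j in range(0,c): …
def passA (grid : List (List String)) (r c : Int) : List (List String) × Nat :=
  (PySem.List.pyRange 0 r 1).foldl (fun st i =>
    (PySem.List.pyRange 0 c 1).foldl (fun st j => stepA r c st (i, j)) st) (grid, 0)

-- number of "@" cells, the termination measure of A's recursion (the lemmas below it are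
-- cited by forklift's decreasing_by and therefore stay above the claim block)
def atRow (row : List String) : Nat := (row.map (fun s => if s = "@" then 1 else 0)).sum
def ats (grid : List (List String)) : Nat := (grid.map atRow).sum

theorem sum_set_nat : ∀ (l : List ℕ) (n : ℕ) (x : ℕ) (h : n < l.length),
    (l.set n x).sum + l[n] = l.sum + x := by
  intro l
  induction l with
  | nil => intro n x h; simp at h
  | cons a t ih =>
    intro n x h
    cases n with
    | zero => simp [List.set]; omega
    | succ m =>
      have hm : m < t.length := by simpa using h
      have := ih m x hm
      simp only [List.set, List.sum_cons, List.getElem_cons_succ]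
      omega

theorem gridCell_shape (g : List (List String)) (i j : Int)
    (h : gridCell g i j = "@") :
    ∃ row, PySem.List.pyGet? g i = some row ∧ PySem.List.pyGet? row j = some "@" := by
  unfold gridCell at h
  cases hg : PySem.List.pyGet? g i with
  | none => rw [hg] at h; simp at h
  | some row =>
    rw [hg] at h
    replace h : (PySem.List.pyGet? row j).getD "" = "@" := h
    cases hr : PySem.List.pyGet? row j with
    | none => rw [hr] at h; simp at h
    | some cell =>
      rw [hr, Option.getD_some] at h
      refine ⟨row, rfl, ?_⟩
      rw [hr]
      exact congrArg some h

theorem gridCell_ranges (g : List (List String)) (i j : Int)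
    (h : gridCell g i j = "@") (hi : 0 ≤ i) (hj : 0 ≤ j) :
    ∃ hlen : i.toNat < g.length, ∃ hlen2 : j.toNat < g[i.toNat].length,
      g[i.toNat][j.toNat] = "@" := by
  obtain ⟨row, hg, hr⟩ := gridCell_shape g i j h
  rw [PySem.List.pyGet?_of_nonneg g hi] at hg
  rw [PySem.List.pyGet?_of_nonneg row hj] at hr
  obtain ⟨h1, h2⟩ := List.getElem?_eq_some_iff.1 hg
  obtain ⟨h3, h4⟩ := List.getElem?_eq_some_iff.1 hr
  subst h2
  exact ⟨h1, h3, h4⟩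

theorem ats_setCell (g : List (List String)) (i j : Int)
    (h : gridCell g i j = "@") (hi : 0 ≤ i) (hj : 0 ≤ j) :
    ats (setCell g i j) + 1 = ats g := by
  obtain ⟨h1, h3, h4⟩ := gridCell_ranges g i j h hi hj
  have hgetD : g.getD i.toNat [] = g[i.toNat] := by
    rw [List.getD_eq_getElem?_getD, List.getElem?_eq_getElem h1, Option.getD_some]
  unfold setCell ats
  rw [hgetD, List.map_set]
  have hrow : atRow (g[i.toNat].set j.toNat "X") + 1 = atRow g[i.toNat] := by
    unfold atRow
    rw [List.map_set]
    have h5 := sum_set_nat (g[i.toNat].map (fun s => if s = "@" then 1 else 0)) j.toNat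
      (if ("X" : String) = "@" then 1 else 0) (by simpa using h3)
    rw [List.getElem_map] at h5
    rw [h4] at h5
    have he : (if ("@" : String) = "@" then (1:ℕ) else 0) = 1 := by simp
    have hx : (if ("X" : String) = "@" then (1:ℕ) else 0) = 0 := by simp
    rw [he, hx] at h5
    rw [hx]
    omega
  have h6 := sum_set_nat (g.map atRow) i.toNat (atRow (g[i.toNat].set j.toNat "X"))
    (by simpa using h1)
  rw [List.getElem_map] at h6
  omega

theorem stepA_ats (r c : Int) (st : List (List String) × Nat) (x : Int × Int)
    (hx : 0 ≤ x.1 ∧ 0 ≤ x.2) :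
    ats (stepA r c st x).1 + (stepA r c st x).2 = ats st.1 + st.2 := by
  unfold stepA
  split_ifs with h1 h2
  · have := ats_setCell st.1 x.1 x.2 h1 hx.1 hx.2
    simp; omega
  · rfl
  · rfl

theorem foldl_stepA_ats (r c : Int) :
    ∀ (L : List (Int × Int)) (st : List (List String) × Nat),
    (∀ x ∈ L, 0 ≤ x.1 ∧ 0 ≤ x.2) →
    ats (L.foldl (stepA r c) st).1 + (L.foldl (stepA r c) st).2 = ats st.1 + st.2 := by
  intro L
  induction L with
  | nil => intro st _; rfl
  | cons a t ih =>
    intro st h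
    have h1 := stepA_ats r c st a (h a (by simp))
    have h2 := ih (stepA r c st a) (fun x hx => h x (by simp [hx]))
    simp only [List.foldl_cons]
    omega

theorem foldl_flatMap_map {σ : Type} (f : σ → Int × Int → σ) :
    ∀ (l1 l2 : List Int) (s : σ),
    (l1.flatMap (fun i => l2.map (fun j => (i, j)))).foldl f s
      = l1.foldl (fun s i => l2.foldl (fun s j => f s (i, j)) s) s := by
  intro l1
  induction l1 with
  | nil => intro l2 s; rfl
  | cons a t ih =>
    intro l2 s
    simp only [List.flatMap_cons, List.foldl_append, List.foldl_cons, List.foldl_map]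
    exact ih l2 _

def allPairs (r c : Int) : List (Int × Int) :=
  (PySem.List.pyRange 0 r 1).flatMap (fun i => (PySem.List.pyRange 0 c 1).map (fun j => (i, j)))

theorem passA_eq_foldl (g : List (List String)) (r c : Int) :
    passA g r c = (allPairs r c).foldl (stepA r c) (g, 0) := by
  unfold passA allPairs
  rw [foldl_flatMap_map]

theorem mem_allPairs (r c : Int) (x : Int × Int) :
    x ∈ allPairs r c ↔ 0 ≤ x.1 ∧ x.1 < r ∧ 0 ≤ x.2 ∧ x.2 < c := by
  obtain ⟨i, j⟩ := x
  simp only [allPairs, List.mem_flatMap, List.mem_map, PySem.List.mem_pyRange_one]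
  constructor
  · rintro ⟨a, ha, b, hb, heq⟩
    injection heq with e1 e2
    subst e1; subst e2
    exact ⟨ha.1, ha.2, hb.1, hb.2⟩
  · rintro ⟨h1, h2, h3, h4⟩
    exact ⟨i, ⟨h1, h2⟩, j, ⟨h3, h4⟩, rfl⟩

theorem passA_ats (g : List (List String)) (r c : Int) :
    ats (passA g r c).1 + (passA g r c).2 = ats g := by
  rw [passA_eq_foldl]
  have := foldl_stepA_ats r c (allPairs r c) (g, 0)
    (fun x hx => by
      have := (mem_allPairs r c x).1 hx
      exact ⟨this.1, this.2.2.1⟩)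
  simpa using this

def forklift (grid : List (List String)) (sum : Int) : Int :=
  let r : Int := grid.length
  let c : Int := ((PySem.List.pyGet? grid 0).getD []).length
  let st := passA grid r c
  if st.2 = 0 then sum + (st.2 : Int) else forklift st.1 (sum + (st.2 : Int))
termination_by ats grid
decreasing_by
  have h2 := passA_ats grid (grid.length : Int) (((PySem.List.pyGet? grid 0).getD []).length : Int)
  simp only [st, r, c] at *
  omega

-- ===== PORT B =====
-- the 8-neighbour offset tuple OFFS
def offs : List (Int × Int) := [(-1,-1),(-1,0),(-1,1),(0,-1),(0,1),(1,-1),(1,0),(1,1)]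

-- len([1 for (di, dj) in OFFS if (i+di, j+dj) in member])
def deg8 (member : List (Int × Int)) (i j : Int) : Nat :=
  (offs.filter (fun d => decide ((i + d.1, j + d.2) ∈ member))).length

-- one simultaneous filtering step: keep the cells with ≥ 4 live 8-neighbours
def stepB (live : List (Int × Int)) : List (Int × Int) :=
  let member := PySem.Set.ofList live
  live.filter (fun x => decide (4 ≤ deg8 member x.1 x.2))

-- the while-True loop
def loopB (live : List (Int × Int)) (sum : Int) (total : Nat) : Int :=
  let keep := stepB live
  if keep.length = live.length then sum + (total : Int) - (keep.length : Int)
  else loopB keep sum total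
termination_by live.length
decreasing_by
  have hle : (stepB live).length ≤ live.length := List.length_filter_le _ _
  simp only [keep] at *
  omega

-- the comprehension [(i, j) for i in range(r) for j in range(c) if grid[i][j] == '@']
def liveCells (grid : List (List String)) (r c : Int) : List (Int × Int) :=
  (PySem.List.pyRange 0 r 1).flatMap (fun i =>
    ((PySem.List.pyRange 0 c 1).filter (fun j => decide (gridCell grid i j = "@"))).map
      (fun j => (i, j)))

def forklift_alt (grid : List (List String)) (sum : Int) : Int :=
  let r : Int := grid.length
  let c : Int := ((PySem.List.pyGet? grid 0).getD []).length
  let live := liveCells grid r c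
  loopB live sum live.length

-- ===== PRECONDITION & SPEC =====
-- Pre_ excludes exactly the inputs on which Python A raises IndexError: the empty grid
-- (len(grid[0])) and grids whose later rows are shorter than row 0 (grid[i][j], j < c).
def Pre_forklift (grid : List (List String)) (sum : Int) : Prop :=
  grid ≠ [] ∧ ∀ row ∈ grid, (grid.headD []).length ≤ row.length
instance (grid : List (List String)) (sum : Int) : Decidable (Pre_forklift grid sum) := by
  unfold Pre_forklift; infer_instance

def pvWitness_forklift : List (List String) × Int := ([["@", "."], [".", "@"]], 3)

def Spec_forklift (grid : List (List String)) (sum : Int) (out : Int) : Prop := out = forklift_alt grid sum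
instance (grid : List (List String)) (sum : Int) (out : Int) : Decidable (Spec_forklift grid sum out) := by unfold Spec_forklift; infer_instance

-- ===== CLAIM (what is proved, stated in full; the proofs are below) =====
def Claim_equal_forklift : Prop := ∀ (grid : List (List String)) (sum : Int), Dom_forklift grid sum → Pre_forklift grid sum → Spec_forklift grid sum (forklift grid sum)

-- ===== LEMMAS AND PROOFS =====

-- ---- the abstract erosion relation on finite sets of coordinates ----

def ind (S : Finset (Int × Int)) (x : Int × Int) : Nat := if x ∈ S then 1 else 0

-- number of live cells in the 3×3 block centred at (i, j), self included
def blkCnt (S : Finset (Int × Int)) (i j : Int) : Nat :=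
  ind S (i-1, j-1) + ind S (i-1, j) + ind S (i-1, j+1) +
  ind S (i, j-1) + ind S (i, j) + ind S (i, j+1) +
  ind S (i+1, j-1) + ind S (i+1, j) + ind S (i+1, j+1)

def keepC (S : Finset (Int × Int)) (x : Int × Int) : Prop := 5 ≤ blkCnt S x.1 x.2

-- one erosion step: a subset survives, every removed cell was removable
def erode (S S' : Finset (Int × Int)) : Prop :=
  S' ⊆ S ∧ ∀ x ∈ S, x ∉ S' → ¬ keepC S x

def stableE (S : Finset (Int × Int)) : Prop := ∀ x ∈ S, keepC S x

theorem ind_mono {T S : Finset (Int × Int)} (h : T ⊆ S) (x : Int × Int) :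
    ind T x ≤ ind S x := by
  unfold ind
  by_cases h1 : x ∈ T
  · rw [if_pos h1, if_pos (h h1)]
  · rw [if_neg h1]; exact Nat.zero_le _

theorem blkCnt_mono {T S : Finset (Int × Int)} (h : T ⊆ S) (i j : Int) :
    blkCnt T i j ≤ blkCnt S i j := by
  unfold blkCnt
  have := fun x => ind_mono h x
  have h1 := this (i-1, j-1); have h2 := this (i-1, j); have h3 := this (i-1, j+1)
  have h4 := this (i, j-1); have h5 := this (i, j); have h6 := this (i, j+1)
  have h7 := this (i+1, j-1); have h8 := this (i+1, j); have h9 := this (i+1, j+1)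
  omega

theorem erode_preserve {T S S' : Finset (Int × Int)} (hT : stableE T) (hTS : T ⊆ S)
    (h : erode S S') : T ⊆ S' := by
  intro x hx
  by_contra hx'
  exact h.2 x (hTS hx) hx' (le_trans (hT x hx) (blkCnt_mono hTS x.1 x.2))

theorem erode_star_preserve {T S S' : Finset (Int × Int)} (hT : stableE T)
    (h : Relation.ReflTransGen erode S S') (hTS : T ⊆ S) : T ⊆ S' := by
  induction h with
  | refl => exact hTS
  | tail _ hstep ih => exact erode_preserve hT ih hstep

theorem erode_star_subset {S S' : Finset (Int × Int)}
    (h : Relation.ReflTransGen erode S S') : S' ⊆ S := by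
  induction h with
  | refl => exact Finset.Subset.refl _
  | tail _ hstep ih => exact Finset.Subset.trans hstep.1 ih

theorem erode_unique {S F1 F2 : Finset (Int × Int)}
    (h1 : Relation.ReflTransGen erode S F1) (s1 : stableE F1)
    (h2 : Relation.ReflTransGen erode S F2) (s2 : stableE F2) : F1 = F2 :=
  Finset.Subset.antisymm
    (erode_star_preserve s1 h2 (erode_star_subset h1))
    (erode_star_preserve s2 h1 (erode_star_subset h2))

-- ---- the live set of a grid, and its characterisations ----

theorem mem_liveCells (g : List (List String)) (r c : Int) (x : Int × Int) :
    x ∈ liveCells g r c ↔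
      0 ≤ x.1 ∧ x.1 < r ∧ 0 ≤ x.2 ∧ x.2 < c ∧ gridCell g x.1 x.2 = "@" := by
  obtain ⟨i, j⟩ := x
  simp only [liveCells, List.mem_flatMap, List.mem_map, List.mem_filter,
    PySem.List.mem_pyRange_one, decide_eq_true_eq]
  constructor
  · rintro ⟨a, ha, b, ⟨hb, hcell⟩, heq⟩
    injection heq with e1 e2
    subst e1; subst e2
    exact ⟨ha.1, ha.2, hb.1, hb.2, hcell⟩
  · rintro ⟨h1, h2, h3, h4, h5⟩
    exact ⟨i, ⟨h1, h2⟩, j, ⟨⟨h3, h4⟩, h5⟩, rfl⟩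

theorem nodup_liveCells (g : List (List String)) (r c : Int) :
    (liveCells g r c).Nodup := by
  unfold liveCells
  rw [List.nodup_flatMap]
  constructor
  · intro i _
    exact ((PySem.List.nodup_pyRange_one 0 c).filter _).map
      (fun a b hab => by injection hab)
  · refine (PySem.List.nodup_pyRange_one 0 r).imp ?_
    intro a b hab x hx1 hx2
    obtain ⟨j1, _, he1⟩ := List.mem_map.1 hx1
    obtain ⟨j2, _, he2⟩ := List.mem_map.1 hx2
    apply hab
    rw [← he1] at he2
    injection he2 with e1 e2
    rw [e1]

def liveS (g : List (List String)) (r c : Int) : Finset (Int × Int) :=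
  (liveCells g r c).toFinset

theorem mem_liveS (g : List (List String)) (r c : Int) (x : Int × Int) :
    x ∈ liveS g r c ↔
      0 ≤ x.1 ∧ x.1 < r ∧ 0 ≤ x.2 ∧ x.2 < c ∧ gridCell g x.1 x.2 = "@" := by
  rw [liveS, List.mem_toFinset]; exact mem_liveCells g r c x

-- ---- neighP counts the live 3×3 block ----

theorem pyRange3 (n : Int) : PySem.List.pyRange (n-1) (n+2) 1 = [n-1, n, n+1] := by
  rw [PySem.List.pyRange_one_cons (by omega)]
  rw [show n - 1 + 1 = n by ring]
  rw [PySem.List.pyRange_one_cons (by omega)]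
  rw [PySem.List.pyRange_one_cons (by omega)]
  rw [show n + 1 + 1 = n + 2 by ring]
  rw [PySem.List.pyRange_one_eq_nil (by omega)]

theorem ind_out (g : List (List String)) (r c : Int) (k l : Int)
    (h : k < 0 ∨ k ≥ r ∨ l < 0 ∨ l ≥ c) : ind (liveS g r c) (k, l) = 0 := by
  unfold ind
  split_ifs with hm
  · rw [mem_liveS] at hm; simp at hm; omega
  · rfl

theorem ind_cell (g : List (List String)) (r c : Int) (k l : Int)
    (hk : 0 ≤ k) (hk2 : k < r) (hl : 0 ≤ l) (hl2 : l < c) :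
    ind (liveS g r c) (k, l) = if gridCell g k l = "@" then 1 else 0 := by
  unfold ind
  by_cases hm : (k, l) ∈ liveS g r c
  · rw [if_pos hm]
    rw [mem_liveS] at hm
    simp only at hm
    rw [if_pos hm.2.2.2.2]
  · rw [if_neg hm]
    rw [mem_liveS] at hm
    simp only at hm
    split_ifs with hc
    · exfalso; exact hm ⟨hk, hk2, hl, hl2, hc⟩
    · rfl

theorem lTerm (g : List (List String)) (r c k l : Int)
    (hk1 : 0 ≤ k) (hk2 : k ≤ r - 1) (p : ℕ) :
    (if l < 0 ∨ l > c - 1 then p else if gridCell g k l = "@" then p + 1 else p)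
      = p + ind (liveS g r c) (k, l) := by
  by_cases h1 : l < 0 ∨ l > c - 1
  · rw [if_pos h1, ind_out g r c k l (by omega)]; omega
  · rw [if_neg h1]
    push_neg at h1
    rw [ind_cell g r c k l hk1 (by omega) h1.1 (by omega)]
    split_ifs <;> omega

theorem rowTerm (g : List (List String)) (r c j : Int) (p : ℕ) (k : Int) :
    (if k < 0 ∨ k > r - 1 then p
     else List.foldl (fun p l =>
        if l < 0 ∨ l > c - 1 then p
        else if gridCell g k l = "@" then p + 1 else p) p [j-1, j, j+1])
      = p + ind (liveS g r c) (k, j-1) + ind (liveS g r c) (k, j)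
          + ind (liveS g r c) (k, j+1) := by
  by_cases hk : k < 0 ∨ k > r - 1
  · rw [if_pos hk, ind_out g r c k (j-1) (by omega), ind_out g r c k j (by omega),
      ind_out g r c k (j+1) (by omega)]
    omega
  · rw [if_neg hk]
    push_neg at hk
    simp only [List.foldl_cons, List.foldl_nil]
    rw [lTerm g r c k (j-1) hk.1 (by omega), lTerm g r c k j hk.1 (by omega),
      lTerm g r c k (j+1) hk.1 (by omega)]

theorem neighP_eq (g : List (List String)) (r c i j : Int) :
    neighP g r c i j = blkCnt (liveS g r c) i j := by
  unfold neighP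
  simp only [pyRange3]
  rw [List.foldl_cons, List.foldl_cons, List.foldl_cons, List.foldl_nil]
  rw [rowTerm g r c j _ (i-1), rowTerm g r c j _ i, rowTerm g r c j _ (i+1)]
  unfold blkCnt
  omega

-- ---- the effect of setCell on the live set ----

theorem gridCell_setCell (g : List (List String)) (i j : Int)
    (h : gridCell g i j = "@") (hi : 0 ≤ i) (hj : 0 ≤ j) (k l : Int)
    (hk : 0 ≤ k) (hl : 0 ≤ l) :
    gridCell (setCell g i j) k l = if k = i ∧ l = j then "X" else gridCell g k l := by
  obtain ⟨h1, h3, h4⟩ := gridCell_ranges g i j h hi hj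
  have hgetD : g.getD i.toNat [] = g[i.toNat] := by
    rw [List.getD_eq_getElem?_getD, List.getElem?_eq_getElem h1, Option.getD_some]
  unfold gridCell setCell
  rw [hgetD]
  rw [PySem.List.pyGet?_of_nonneg _ hk, PySem.List.pyGet?_of_nonneg _ hk]
  by_cases hki : k = i
  · subst hki
    rw [List.getElem?_set, if_pos rfl, if_pos h1]
    rw [List.getElem?_eq_getElem h1]
    rw [Option.bind_some, Option.bind_some]
    rw [PySem.List.pyGet?_of_nonneg _ hl, PySem.List.pyGet?_of_nonneg _ hl]
    by_cases hlj : l = j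
    · subst hlj
      rw [if_pos ⟨rfl, rfl⟩]
      rw [List.getElem?_set, if_pos rfl, if_pos h3]
      rfl
    · rw [if_neg (by rintro ⟨-, e⟩; exact hlj e)]
      rw [List.getElem?_set_ne (by omega)]
  · rw [if_neg (by rintro ⟨e, -⟩; exact hki e)]
    rw [List.getElem?_set_ne (by omega)]

theorem liveS_setCell (g : List (List String)) (r c : Int) (i j : Int)
    (h : gridCell g i j = "@") (hi : 0 ≤ i) (hj : 0 ≤ j) :
    liveS (setCell g i j) r c = (liveS g r c).erase (i, j) := by
  apply Finset.ext
  intro x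
  rw [Finset.mem_erase, mem_liveS, mem_liveS]
  constructor
  · rintro ⟨h1, h2, h3, h4, h5⟩
    rw [gridCell_setCell g i j h hi hj x.1 x.2 h1 h3] at h5
    split_ifs at h5 with hx
    · simp at h5
    · refine ⟨?_, h1, h2, h3, h4, h5⟩
      intro he; apply hx; constructor
      · exact congrArg Prod.fst he
      · exact congrArg Prod.snd he
  · rintro ⟨hne, h1, h2, h3, h4, h5⟩
    refine ⟨h1, h2, h3, h4, ?_⟩
    rw [gridCell_setCell g i j h hi hj x.1 x.2 h1 h3]
    split_ifs with hx
    · exfalso; apply hne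
      obtain ⟨e1, e2⟩ := hx
      cases x; simp_all
    · exact h5

theorem rowLens_setCell (g : List (List String)) (i j : Int) :
    (setCell g i j).map List.length = g.map List.length := by
  unfold setCell
  rw [List.map_set]
  by_cases h : i.toNat < g.length
  · have hgetD : g.getD i.toNat [] = g[i.toNat] := by
      rw [List.getD_eq_getElem?_getD, List.getElem?_eq_getElem h, Option.getD_some]
    rw [hgetD, List.length_set]
    have : g[i.toNat].length = (g.map List.length)[i.toNat]'(by simpa using h) := by
      rw [List.getElem_map]
    rw [this, List.set_getElem_self]
  · apply List.set_eq_of_length_le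
    simpa using Nat.le_of_not_lt h

-- ---- simulation of one pass of A ----

theorem stepA_sim (r c : Int) (st : List (List String) × Nat) (x : Int × Int)
    (hx : 0 ≤ x.1 ∧ x.1 < r ∧ 0 ≤ x.2 ∧ x.2 < c) :
    (stepA r c st x).1.map List.length = st.1.map List.length ∧
    Relation.ReflTransGen erode (liveS st.1 r c) (liveS (stepA r c st x).1 r c) ∧
    (stepA r c st x).2 + (liveS (stepA r c st x).1 r c).card
      = st.2 + (liveS st.1 r c).card := by
  obtain ⟨i, j⟩ := x
  obtain ⟨hx1, hx2, hx3, hx4⟩ := hx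
  unfold stepA
  split_ifs with h1 h2
  · -- fired: the cell is live and removable
    dsimp only at h2
    have hmem : (i, j) ∈ liveS st.1 r c := (mem_liveS st.1 r c (i, j)).2 ⟨hx1, hx2, hx3, hx4, h1⟩
    have herase := liveS_setCell st.1 r c i j h1 hx1 hx3
    refine ⟨rowLens_setCell st.1 i j, ?_, ?_⟩
    · apply Relation.ReflTransGen.single
      rw [herase]
      constructor
      · exact Finset.erase_subset _ _
      · intro y hy hy'
        have : y = (i, j) := by
          by_contra hne
          exact hy' (Finset.mem_erase.2 ⟨hne, hy⟩)
        subst this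
        rw [keepC]
        dsimp only
        rw [← neighP_eq]
        omega
    · rw [herase, Finset.card_erase_of_mem hmem]
      have hpos : 0 < (liveS st.1 r c).card := Finset.card_pos.2 ⟨(i, j), hmem⟩
      omega
  · exact ⟨rfl, Relation.ReflTransGen.refl, rfl⟩
  · exact ⟨rfl, Relation.ReflTransGen.refl, rfl⟩

theorem foldl_stepA_sim (r c : Int) :
    ∀ (L : List (Int × Int)) (st : List (List String) × Nat),
    (∀ x ∈ L, 0 ≤ x.1 ∧ x.1 < r ∧ 0 ≤ x.2 ∧ x.2 < c) →
    (L.foldl (stepA r c) st).1.map List.length = st.1.map List.length ∧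
    Relation.ReflTransGen erode (liveS st.1 r c) (liveS (L.foldl (stepA r c) st).1 r c) ∧
    (L.foldl (stepA r c) st).2 + (liveS (L.foldl (stepA r c) st).1 r c).card
      = st.2 + (liveS st.1 r c).card := by
  intro L
  induction L with
  | nil => intro st _; exact ⟨rfl, Relation.ReflTransGen.refl, rfl⟩
  | cons a t ih =>
    intro st h
    obtain ⟨s1, s2, s3⟩ := stepA_sim r c st a (h a (by simp))
    obtain ⟨i1, i2, i3⟩ := ih (stepA r c st a) (fun x hx => h x (by simp [hx]))
    refine ⟨by rw [List.foldl_cons, i1, s1], ?_, ?_⟩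
    · rw [List.foldl_cons]; exact Relation.ReflTransGen.trans s2 i2
    · rw [List.foldl_cons]; omega

theorem stepA_count_fix (r c : Int) (st : List (List String) × Nat) (x : Int × Int)
    (h : (stepA r c st x).2 = st.2) : stepA r c st x = st := by
  unfold stepA at *
  split_ifs at * <;> simp_all

theorem stepA_count_mono (r c : Int) (st : List (List String) × Nat) (x : Int × Int) :
    st.2 ≤ (stepA r c st x).2 := by
  unfold stepA; split_ifs <;> simp

theorem foldl_count_mono (r c : Int) :
    ∀ (L : List (Int × Int)) (st : List (List String) × Nat),
    st.2 ≤ (L.foldl (stepA r c) st).2 := by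
  intro L
  induction L with
  | nil => intro st; exact le_refl _
  | cons a t ih =>
    intro st
    exact le_trans (stepA_count_mono r c st a) (ih (stepA r c st a))

theorem foldl_count_fix (r c : Int) :
    ∀ (L : List (Int × Int)) (st : List (List String) × Nat),
    (L.foldl (stepA r c) st).2 = st.2 → ∀ x ∈ L, stepA r c st x = st := by
  intro L
  induction L with
  | nil => intro st _ x hx; simp at hx
  | cons a t ih =>
    intro st h x hx
    have h1 : (stepA r c st a).2 = st.2 := by
      have m1 := stepA_count_mono r c st a
      have m2 := foldl_count_mono r c t (stepA r c st a)
      rw [List.foldl_cons] at h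
      omega
    have hfix := stepA_count_fix r c st a h1
    rcases List.mem_cons.1 hx with he | ht
    · subst he; exact hfix
    · apply ih st _ x ht
      rw [List.foldl_cons] at h
      rw [hfix] at h
      exact h

theorem pass_stable (g : List (List String)) (r c : Int)
    (h : (passA g r c).2 = 0) : stableE (liveS g r c) := by
  intro x hx
  rw [mem_liveS] at hx
  obtain ⟨h1, h2, h3, h4, h5⟩ := hx
  have hmem : x ∈ allPairs r c := (mem_allPairs r c x).2 ⟨h1, h2, h3, h4⟩
  have hfix := foldl_count_fix r c (allPairs r c) (g, 0)
    (by rw [← passA_eq_foldl]; simpa using h) x hmem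
  unfold stepA at hfix
  simp only [h5, if_true] at hfix
  split_ifs at hfix with hp
  · exfalso
    have : (1 : ℕ) = 0 := congrArg Prod.snd hfix
    simp at this
  · rw [keepC, ← neighP_eq]
    omega

theorem passA_sim (g : List (List String)) (r c : Int) :
    (passA g r c).1.map List.length = g.map List.length ∧
    Relation.ReflTransGen erode (liveS g r c) (liveS (passA g r c).1 r c) ∧
    (passA g r c).2 + (liveS (passA g r c).1 r c).card = (liveS g r c).card := by
  have := foldl_stepA_sim r c (allPairs r c) (g, 0)
    (fun x hx => (mem_allPairs r c x).1 hx)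
  rw [← passA_eq_foldl] at this
  exact ⟨this.1, this.2.1, by have := this.2.2; simpa using this⟩

-- ---- characterisation of A's recursion ----

theorem len_getD_getElem? (g : List (List String)) :
    ((g[0]?).getD []).length = ((g.map List.length)[0]?).getD 0 := by
  cases g <;> rfl

theorem row0_len_of_rowLens {g g' : List (List String)}
    (h : g'.map List.length = g.map List.length) :
    (((PySem.List.pyGet? g' 0).getD []).length : Int)
      = (((PySem.List.pyGet? g 0).getD []).length : Int) := by
  rw [PySem.List.pyGet?_zero, PySem.List.pyGet?_zero, len_getD_getElem?,
    len_getD_getElem?, h]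

theorem forklift_base (g : List (List String)) (s r c : Int)
    (hr : (g.length : Int) = r)
    (hc : (((PySem.List.pyGet? g 0).getD []).length : Int) = c)
    (h0 : (passA g r c).2 = 0) :
    forklift g s = s + ((liveS g r c).card : Int) - ((liveS g r c).card : Int) := by
  rw [forklift]
  rw [hr, hc]
  rw [if_pos h0, h0]
  push_cast
  ring

theorem forklift_char :
    ∀ (N : ℕ) (g : List (List String)) (s r c : Int), ats g ≤ N →
    (g.length : Int) = r → ((((PySem.List.pyGet? g 0).getD []).length : Int) = c) →
    ∃ F, Relation.ReflTransGen erode (liveS g r c) F ∧ stableE F ∧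
      forklift g s = s + ((liveS g r c).card : Int) - (F.card : Int) := by
  intro N
  induction N with
  | zero =>
    intro g s r c hN hr hc
    have hats := passA_ats g r c
    have h0 : (passA g r c).2 = 0 := by omega
    exact ⟨liveS g r c, Relation.ReflTransGen.refl, pass_stable g r c h0,
      forklift_base g s r c hr hc h0⟩
  | succ n ih =>
    intro g s r c hN hr hc
    have hats := passA_ats g r c
    obtain ⟨hlen, hreach, hcard⟩ := passA_sim g r c
    by_cases h0 : (passA g r c).2 = 0
    · exact ⟨liveS g r c, Relation.ReflTransGen.refl, pass_stable g r c h0,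
        forklift_base g s r c hr hc h0⟩
    · have hlen' : (passA g r c).1.length = g.length := by
        have h := congrArg List.length hlen
        simpa using h
      have hr' : ((passA g r c).1.length : Int) = r := by rw [hlen']; exact hr
      have hc' : (((PySem.List.pyGet? (passA g r c).1 0).getD []).length : Int) = c :=
        (row0_len_of_rowLens hlen).trans hc
      obtain ⟨F, hF1, hF2, hF3⟩ := ih (passA g r c).1 (s + ((passA g r c).2 : Int)) r c
        (by omega) hr' hc'
      refine ⟨F, Relation.ReflTransGen.trans hreach hF1, hF2, ?_⟩
      rw [forklift]
      rw [hr, hc]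
      rw [if_neg h0]
      rw [hF3]
      push_cast
      omega

-- ---- characterisation of B's loop ----

theorem deg8_blkCnt (live : List (Int × Int)) (x : Int × Int) (hx : x ∈ live) :
    blkCnt live.toFinset x.1 x.2 = deg8 (PySem.Set.ofList live) x.1 x.2 + 1 := by
  obtain ⟨i, j⟩ := x
  have hmem : ∀ y : Int × Int, (y ∈ PySem.Set.ofList live) ↔ (y ∈ live.toFinset) := by
    intro y
    rw [PySem.Set.mem_ofList, List.mem_toFinset]
  unfold deg8 offs blkCnt ind
  rw [← List.countP_eq_length_filter]
  simp only [List.countP_cons, List.countP_nil, decide_eq_true_eq, hmem]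
  rw [if_pos (List.mem_toFinset.2 hx)]
  simp only [sub_eq_add_neg]
  norm_num
  omega

theorem mem_stepB (live : List (Int × Int)) (x : Int × Int) :
    x ∈ stepB live ↔ x ∈ live ∧ 4 ≤ deg8 (PySem.Set.ofList live) x.1 x.2 := by
  simp [stepB, List.mem_filter]

theorem loopB_char :
    ∀ (N : ℕ) (live : List (Int × Int)) (s : Int) (total : ℕ), live.length ≤ N →
    live.Nodup →
    ∃ F, Relation.ReflTransGen erode live.toFinset F ∧ stableE F ∧
      loopB live s total = s + (total : Int) - (F.card : Int) := by
  intro N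
  induction N with
  | zero =>
    intro live s total hN hnd
    have hnil : live = [] := List.eq_nil_of_length_eq_zero (by omega)
    subst hnil
    refine ⟨(∅ : Finset (Int × Int)), Relation.ReflTransGen.refl,
      fun x hx => absurd hx (Finset.notMem_empty x), ?_⟩
    rw [loopB]
    simp [stepB]
  | succ n ih =>
    intro live s total hN hnd
    by_cases heq : (stepB live).length = live.length
    · have hall : ∀ x ∈ live, 4 ≤ deg8 (PySem.Set.ofList live) x.1 x.2 := by
        intro x hxl
        have := List.length_filter_eq_length_iff.1 heq x hxl
        simpa using this
      refine ⟨live.toFinset, Relation.ReflTransGen.refl, ?_, ?_⟩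
      · intro x hx
        have hxl := List.mem_toFinset.1 hx
        have h4 := hall x hxl
        have hd := deg8_blkCnt live x hxl
        rw [keepC]
        omega
      · rw [loopB]
        rw [if_pos heq, heq, List.toFinset_card_of_nodup hnd]
    · have hsub : (stepB live).length ≤ live.length := List.length_filter_le _ _
      have hnd' : (stepB live).Nodup := hnd.filter _
      obtain ⟨F, hF1, hF2, hF3⟩ := ih (stepB live) s total (by omega) hnd'
      refine ⟨F, Relation.ReflTransGen.head ?_ hF1, hF2, ?_⟩
      · constructor
        · intro y hy
          rw [List.mem_toFinset] at hy ⊢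
          exact ((mem_stepB live y).1 hy).1
        · intro y hy hy'
          rw [List.mem_toFinset] at hy hy'
          rw [mem_stepB] at hy'
          push_neg at hy'
          have hdeg := hy' hy
          have hd := deg8_blkCnt live y hy
          rw [keepC]
          omega
      · rw [loopB]
        rw [if_neg heq]
        exact hF3

-- ===== VERDICT (by name: the statement is the Claim_ definition above) =====
theorem forklift_spec : Claim_equal_forklift := by
  intro grid sum _ _
  unfold Spec_forklift
  obtain ⟨FA, hA1, hA2, hA3⟩ := forklift_char (ats grid) grid sum grid.length
    (((PySem.List.pyGet? grid 0).getD []).length : Int) (le_refl _) rfl rfl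
  obtain ⟨FB, hB1, hB2, hB3⟩ := loopB_char
    (liveCells grid grid.length (((PySem.List.pyGet? grid 0).getD []).length : Int)).length
    (liveCells grid grid.length (((PySem.List.pyGet? grid 0).getD []).length : Int))
    sum
    (liveCells grid grid.length (((PySem.List.pyGet? grid 0).getD []).length : Int)).length
    (le_refl _) (nodup_liveCells _ _ _)
  have hFeq : FA = FB := erode_unique hA1 hA2 hB1 hB2
  have hcard : ((liveCells grid grid.length
      (((PySem.List.pyGet? grid 0).getD []).length : Int)).length : ℕ)
      = (liveS grid grid.length (((PySem.List.pyGet? grid 0).getD []).length : Int)).card := by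
    rw [liveS, List.toFinset_card_of_nodup (nodup_liveCells _ _ _)]
  rw [hA3]
  show _ = forklift_alt grid sum
  unfold forklift_alt
  simp only []
  rw [hB3, hFeq, hcard]
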